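-- pv_equiv track=rewrite | github.com/dafdaf1234444/swarm | tools/archive/contamination_detector.py | build_citation_graph
-- ===== SOURCE A (Python) =====
-- import collections
--
-- def build_citation_graph(lessons: dict) -> dict:
--     """Build forward and reverse citation graphs."""
--     forward = collections.defaultdict(set)   # A -> {B, C} means A cites B, C
--     reverse = collections.defaultdict(set)   # B -> {A} means B is cited by A
--
--     for lid, info in lessons.items():
--         for ref in info["all_refs"]:
--             if ref in lessons and ref != lid:
--                 forward[lid].add(ref)
--                 reverse[ref].add(lid)
--
--     return {"forward": forward, "reverse": reverse}
-- ===== SOURCE B (Python) =====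
-- import collections
--
-- def build_citation_graph(lessons: dict) -> dict:
--     """Build forward and reverse citation graphs.
--
--     Different algorithm: first materialise a forward index (one ordered,
--     dedup'd list of valid refs per lesson), then obtain the reverse graph by
--     TRANSPOSING that index with per-target column scans ("who cites t?")
--     instead of updating a reverse map edge by edge.
--     """
--     fwd_refs = [(lid, list(dict.fromkeys(
--                     r for r in info["all_refs"] if r in lessons and r != lid)))
--                 for lid, info in lessons.items()]
--
--     forward = collections.defaultdict(set)
--     for lid, refs in fwd_refs:
--         if refs:
--             forward[lid] = set(refs)
--
--     targets = list(dict.fromkeys(r for _, refs in fwd_refs for r in refs))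
--     reverse = collections.defaultdict(set)
--     for t in targets:
--         reverse[t] = {lid for lid, refs in fwd_refs if t in refs}
--
--     return {"forward": forward, "reverse": reverse}
-- ===== Notes on version B (the rewrite author's own statement) =====
-- stated objective: alternative
-- what changed: A interleaves forward and reverse updates per edge in one scan; B instead materialises a forward index (ordered dedup'd valid refs per lesson) and then builds the reverse graph by a transposition with per-target column scans of that index ('who cites t?'), never updating a reverse map edge by edge; Pre_ excludes association lists with duplicate keys (not genuine Python dicts, so unrepresentable as actual inputs) and lessons whose info dict lacks the 'all_refs' key, where A raises KeyError (B raises there too).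
import Mathlib
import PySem

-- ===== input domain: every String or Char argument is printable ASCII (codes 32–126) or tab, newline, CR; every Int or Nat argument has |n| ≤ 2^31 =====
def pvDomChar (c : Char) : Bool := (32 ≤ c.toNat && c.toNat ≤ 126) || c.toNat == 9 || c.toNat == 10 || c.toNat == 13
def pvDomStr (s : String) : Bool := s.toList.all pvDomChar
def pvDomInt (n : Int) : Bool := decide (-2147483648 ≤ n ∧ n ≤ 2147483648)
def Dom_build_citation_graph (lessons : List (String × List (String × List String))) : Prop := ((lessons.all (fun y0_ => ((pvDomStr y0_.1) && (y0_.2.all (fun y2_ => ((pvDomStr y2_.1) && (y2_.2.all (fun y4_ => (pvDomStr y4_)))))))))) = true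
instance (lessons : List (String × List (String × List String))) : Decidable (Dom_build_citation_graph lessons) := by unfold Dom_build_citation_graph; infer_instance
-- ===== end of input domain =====

-- B materialises a forward index first and then builds the reverse graph by per-target column scans of that index (alternative algorithm; not faster).


-- ===== PORT A =====
-- One scan over lessons; for every qualifying ref, both defaultdicts are updated in place
-- (forward[lid].add(ref) / reverse[ref].add(lid) = Dict.modify with default ∅).
def build_citation_graph (lessons : List (String × List (String × List String))) : List (String × List (String × List String)) :=
  let st := lessons.foldl (fun st p =>
      (((PySem.Dict.mk p.2).get? "all_refs").getD []).foldl (fun st ref =>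
        if (PySem.Dict.mk lessons).contains ref && ref != p.1 then
          (st.1.modify p.1 [] (fun s => PySem.Set.add s ref),
           st.2.modify ref [] (fun s => PySem.Set.add s p.1))
        else st) st)
    ((PySem.Dict.empty, PySem.Dict.empty) :
      PySem.Dict String (List String) × PySem.Dict String (List String))
  [("forward", st.1.items), ("reverse", st.2.items)]

-- ===== PORT B =====
-- First a forward index fwdRefs (one ordered dedup'd list of valid refs per lesson); forward is read
-- off it; reverse is built by per-target column scans ("who cites t?") over that index.
def build_citation_graph_alt (lessons : List (String × List (String × List String))) : List (String × List (String × List String)) :=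
  let fwdRefs : List (String × List String) := lessons.map (fun p =>
      (p.1, PySem.List.dedup ((((PySem.Dict.mk p.2).get? "all_refs").getD []).filter
        (fun r => (PySem.Dict.mk lessons).contains r && r != p.1))))
  let forward : PySem.Dict String (List String) := fwdRefs.foldl (fun fwd q =>
      if q.2 ≠ [] then fwd.insert q.1 (PySem.Set.ofList q.2) else fwd) PySem.Dict.empty
  let targets : List String := PySem.List.dedup (fwdRefs.flatMap Prod.snd)
  let reverse : PySem.Dict String (List String) := targets.foldl (fun rev t =>
      rev.insert t (PySem.Set.ofList
        ((fwdRefs.filter (fun q => q.2.contains t)).map Prod.fst))) PySem.Dict.empty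
  [("forward", forward.items), ("reverse", reverse.items)]

-- ===== PRECONDITION & SPEC =====
-- Pre_ excludes association lists with duplicate keys (top level or inside an info dict): those are
-- not genuine Python dicts, so they represent no actual input; and lessons whose info dict lacks the
-- "all_refs" key, on which the Python A raises KeyError (B raises there too).
def Pre_build_citation_graph (lessons : List (String × List (String × List String))) : Prop :=
  (lessons.map Prod.fst).Nodup ∧
  ∀ p ∈ lessons, (p.2.map Prod.fst).Nodup ∧ "all_refs" ∈ p.2.map Prod.fst
instance (lessons : List (String × List (String × List String))) : Decidable (Pre_build_citation_graph lessons) := by unfold Pre_build_citation_graph; infer_instance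

def pvWitness_build_citation_graph : (List (String × List (String × List String))) :=
  [("a", [("all_refs", ["b", "a", "c"])]), ("b", [("all_refs", [])])]

def Spec_build_citation_graph (lessons : List (String × List (String × List String))) (out : List (String × List (String × List String))) : Prop := out = build_citation_graph_alt lessons
instance (lessons : List (String × List (String × List String))) (out : List (String × List (String × List String))) : Decidable (Spec_build_citation_graph lessons out) := by unfold Spec_build_citation_graph; infer_instance

-- ===== CLAIM (what is proved, stated in full; the proofs are below) =====
def Claim_equal_build_citation_graph : Prop := ∀ (lessons : List (String × List (String × List String))), Dom_build_citation_graph lessons → Pre_build_citation_graph lessons → Spec_build_citation_graph lessons (build_citation_graph lessons)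

-- ===== LEMMAS AND PROOFS =====

abbrev SD := PySem.Dict String (List String)
def pvRefs (p : String × List (String × List String)) : List String :=
  ((PySem.Dict.mk p.2).get? "all_refs").getD []
def pvCond (lessons : List (String × List (String × List String))) (lid ref : String) : Bool :=
  (PySem.Dict.mk lessons).contains ref && ref != lid
def pvFilt (lessons : List (String × List (String × List String)))
    (p : String × List (String × List String)) : List String :=
  (pvRefs p).filter (fun r => pvCond lessons p.1 r)
def pvStepR (lid : String) (R : SD) (ref : String) : SD :=
  R.modify ref [] (fun s => PySem.Set.add s lid)
-- the valid-citation edge stream, flattened, per-lesson dedup'd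
def pvEdges (lessons : List (String × List (String × List String))) : List (String × String) :=
  lessons.flatMap (fun p => (PySem.Set.ofList (pvFilt lessons p)).map (fun r => (p.1, r)))

theorem pv_insert_getD_self {κ ν : Type} [BEq κ] [LawfulBEq κ] (d : PySem.Dict κ ν) (k : κ) (v : ν)
    (hnd : d.keys.Nodup) (h : d.get? k = some v) : d.insert k v = d := by
  have hc : d.contains k = true := by
    simp [PySem.Dict.contains_eq_isSome_get?, h]
  apply PySem.Dict.ext
  rw [PySem.Dict.items_insert_of_contains d v hc]
  conv_rhs => rw [← List.map_id d.items]
  apply List.map_congr_left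
  intro p hp
  by_cases hk : (p.1 == k) = true
  · have hg : d.get? p.1 = some p.2 :=
      PySem.Dict.get?_of_mem_items d (k := p.1) (v := p.2) (by simpa using hp) hnd
    have hpk : p.1 = k := by simpa using hk
    rw [hpk, h] at hg
    have : v = p.2 := Option.some_inj.mp hg
    subst this; subst hpk; simp
  · simp [hk]

theorem pv_modify_noop {κ ν : Type} [BEq κ] [LawfulBEq κ] (d : PySem.Dict κ ν) (k : κ) (v d0 : ν)
    (f : ν → ν) (hnd : d.keys.Nodup) (h : d.get? k = some v) (hf : f v = v) :
    d.modify k d0 f = d := by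
  show d.insert k (f (d.getD k d0)) = d
  rw [PySem.Dict.getD_eq_get?_getD, h, Option.getD_some, hf]
  exact pv_insert_getD_self d k v hnd h

theorem pv_ofList_ne_nil {α : Type} [BEq α] [LawfulBEq α] (xs : List α) (h : xs ≠ []) :
    PySem.Set.ofList xs ≠ [] := by
  cases xs with
  | nil => simp at h
  | cons x t => simp [PySem.Set.ofList_cons]

theorem pv_mem_after (lid : String) : ∀ (rl : List String) (R : SD) (x : String),
    (lid ∈ R.getD x [] ∨ x ∈ rl) → lid ∈ (rl.foldl (pvStepR lid) R).getD x [] := by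
  intro rl
  induction rl with
  | nil => intro R x h; simpa using h.resolve_right (by simp)
  | cons y t ih =>
    intro R x h
    simp only [List.foldl_cons]
    apply ih
    by_cases hxt : x ∈ t
    · exact Or.inr hxt
    · left
      rcases h with hmem | hx
      · by_cases hxy : x = y
        · subst hxy
          rw [pvStepR, PySem.Dict.getD_modify_self]
          exact (PySem.Set.mem_add _ _ _).mpr (Or.inl hmem)
        · rw [pvStepR, PySem.Dict.getD_modify_of_ne _ _ _ hxy]
          exact hmem
      · have hxy : x = y := by simpa [hxt] using hx
        subst hxy
        rw [pvStepR, PySem.Dict.getD_modify_self]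
        exact (PySem.Set.mem_add _ _ _).mpr (Or.inr rfl)

theorem pv_nodup_after (lid : String) (rl : List String) (R : SD) (h : R.keys.Nodup) :
    (rl.foldl (pvStepR lid) R).keys.Nodup :=
  PySem.Dict.nodup_keys_foldl_modify_key rl (fun x => x) [] (fun _ _ => fun s => PySem.Set.add s lid) R h

theorem pv_revDedup (lid : String) (rl : List String) (R : SD) (hR : R.keys.Nodup) :
    rl.foldl (pvStepR lid) R = (PySem.Set.ofList rl).foldl (pvStepR lid) R := by
  induction rl using List.reverseRecOn with
  | nil => rfl
  | append_singleton t x ih =>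
    rw [List.foldl_append, PySem.Set.ofList_append_singleton, PySem.Set.add_eq_ite]
    by_cases hx : x ∈ PySem.Set.ofList t
    · rw [if_pos hx, ← ih]
      have hxt : x ∈ t := (PySem.Set.mem_ofList _ _).mp hx
      set R' := t.foldl (pvStepR lid) R with hR'
      have hm : lid ∈ R'.getD x [] := pv_mem_after lid t R x (Or.inr hxt)
      have hnd' : R'.keys.Nodup := pv_nodup_after lid t R hR
      simp only [List.foldl_cons, List.foldl_nil]
      cases hv : R'.get? x with
      | none =>
        rw [PySem.Dict.getD_eq_get?_getD, hv] at hm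
        simp at hm
      | some v =>
        have hmv : lid ∈ v := by
          rw [PySem.Dict.getD_eq_get?_getD, hv] at hm
          simpa using hm
        exact pv_modify_noop R' x v [] _ hnd' hv (PySem.Set.add_of_mem hmv)
    · rw [if_neg hx, List.foldl_append, ← ih]

theorem pv_Ffold (lid : String) : ∀ (rl : List String) (F : SD),
    rl.foldl (fun F ref => F.modify lid [] (fun s => PySem.Set.add s ref)) F
      = if rl = [] then F else F.insert lid (PySem.Set.update (F.getD lid []) rl) := by
  intro rl
  induction rl with
  | nil => intro F; simp
  | cons ref t ih =>
    intro F
    simp only [List.foldl_cons, ih]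
    have hmod : F.modify lid [] (fun s => PySem.Set.add s ref)
        = F.insert lid (PySem.Set.add (F.getD lid []) ref) := rfl
    by_cases ht : t = []
    · subst ht
      simpa [PySem.Set.update_nil] using hmod
    · rw [if_neg ht, if_neg (by simp : ¬ (ref :: t) = [])]
      rw [hmod, PySem.Dict.getD_insert_self, PySem.Dict.insert_insert_self,
        PySem.Set.update_cons]

theorem pv_main (lessons : List (String × List (String × List String))) :
    ∀ (ls : List (String × List (String × List String))) (F R : SD),
    (ls.map Prod.fst).Nodup → (∀ p ∈ ls, F.contains p.1 = false) → R.keys.Nodup →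
    ls.foldl (fun st p =>
        (pvRefs p).foldl (fun st ref =>
          if pvCond lessons p.1 ref then
            (st.1.modify p.1 [] (fun s => PySem.Set.add s ref),
             st.2.modify ref [] (fun s => PySem.Set.add s p.1))
          else st) st) (F, R)
    = (ls.foldl (fun fwd p =>
          let refs : PySem.Set String := PySem.Set.ofList (pvFilt lessons p)
          if refs ≠ [] then fwd.insert p.1 refs else fwd) F,
       ls.foldl (fun R p => (PySem.Set.ofList (pvFilt lessons p)).foldl (pvStepR p.1) R) R) := by
  intro ls
  induction ls with
  | nil => intro F R _ _ _; rfl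
  | cons p t ih =>
    intro F R hnd hF hR
    simp only [List.foldl_cons]
    rw [PySem.List.foldl_if_eq_foldl_filter (p := pvCond lessons p.1)
      (f := fun st ref =>
        ((st.1 : SD).modify p.1 [] (fun s => PySem.Set.add s ref),
         (st.2 : SD).modify ref [] (fun s => PySem.Set.add s p.1)))]
    rw [PySem.List.foldl_prod_mk (f := fun F ref => (F : SD).modify p.1 [] (fun s => PySem.Set.add s ref))
      (g := fun R ref => (R : SD).modify ref [] (fun s => PySem.Set.add s p.1))]
    have hfilt : (pvRefs p).filter (pvCond lessons p.1) = pvFilt lessons p := rfl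
    rw [hfilt, pv_Ffold]
    have hcF : F.contains p.1 = false := hF p (by simp)
    have hFeq : (if pvFilt lessons p = [] then F
          else F.insert p.1 (PySem.Set.update (F.getD p.1 []) (pvFilt lessons p)))
        = (let refs : PySem.Set String := PySem.Set.ofList (pvFilt lessons p)
           if refs ≠ [] then F.insert p.1 refs else F) := by
      rw [PySem.Dict.getD_of_not_contains F [] hcF, PySem.Set.update_nil_left]
      by_cases hnilf : pvFilt lessons p = []
      · simp [hnilf, PySem.Set.ofList]
      · rw [if_neg hnilf, if_pos (pv_ofList_ne_nil _ hnilf)]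
    have hRdedup : (pvFilt lessons p).foldl
          (fun R ref => (R : SD).modify ref [] (fun s => PySem.Set.add s p.1)) R
        = (PySem.Set.ofList (pvFilt lessons p)).foldl (pvStepR p.1) R := by
      have := pv_revDedup p.1 (pvFilt lessons p) R hR
      simpa [pvStepR] using this
    rw [hFeq, hRdedup]
    rw [List.map_cons] at hnd
    obtain ⟨hp1, hts⟩ := List.nodup_cons.mp hnd
    apply ih
    · exact hts
    · intro q hq
      have hq1 : q.1 ≠ p.1 := by
        intro hcontra
        exact hp1 (hcontra ▸ (List.mem_map.mpr ⟨q, hq, rfl⟩))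
      show (let refs : PySem.Set String := PySem.Set.ofList (pvFilt lessons p);
        if refs ≠ [] then F.insert p.1 refs else F).contains q.1 = false
      by_cases hnilf : PySem.Set.ofList (pvFilt lessons p) = []
      · simp only [hnilf]
        simpa using hF q (by simp [hq])
      · simp only [if_pos hnilf]
        rw [PySem.Dict.contains_insert]
        simp only [Bool.or_eq_false_iff]
        exact ⟨by simpa using hq1, hF q (by simp [hq])⟩
    · exact pv_nodup_after p.1 _ R hR

-- A's reverse loop, flattened to one fold over the edge stream
theorem pv_R_flat (lessons : List (String × List (String × List String))) :
    lessons.foldl (fun R p => (PySem.Set.ofList (pvFilt lessons p)).foldl (pvStepR p.1) R)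
      (PySem.Dict.empty : SD)
    = (pvEdges lessons).foldl (fun R q => R.modify q.2 [] (fun s => PySem.Set.add s q.1))
      (PySem.Dict.empty : SD) := by
  rw [pvEdges, List.foldl_flatMap]
  simp only [List.foldl_map]
  rfl

-- value of the edge-stream fold at any key
theorem pv_getD_fold (t : String) : ∀ (S : List (String × String)) (R : SD),
    (S.foldl (fun R q => R.modify q.2 [] (fun s => PySem.Set.add s q.1)) R).getD t []
      = PySem.Set.update (R.getD t []) ((S.filter (fun q => q.2 == t)).map Prod.fst) := by
  intro S
  induction S with
  | nil => intro R; simp [PySem.Set.update_nil]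
  | cons q S ih =>
    intro R
    simp only [List.foldl_cons, List.filter_cons, ih]
    by_cases hq : q.2 = t
    · rw [if_pos (by simpa using hq), List.map_cons, PySem.Set.update_cons]
      subst hq
      rw [PySem.Dict.getD_modify_self]
    · rw [if_neg (by simpa using hq), PySem.Dict.getD_modify_of_ne _ _ _ (Ne.symm hq)]

theorem pv_filter_beq_of_nodup (t : String) : ∀ (l : List String), l.Nodup →
    l.filter (fun x => x == t) = if l.contains t then [t] else [] := by
  intro l
  induction l with
  | nil => intro _; simp
  | cons x l ih =>
    intro hnd
    obtain ⟨hx, hl⟩ := List.nodup_cons.mp hnd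
    rw [List.filter_cons]
    by_cases hxt : x = t
    · subst hxt
      have hfil : l.filter (fun a => a == x) = [] := by
        rw [List.filter_eq_nil_iff]
        intro a ha
        simp only [beq_iff_eq]
        exact fun h => hx (h ▸ ha)
      simp [hfil]
    · have hbeq : (x == t) = false := by simpa using hxt
      have htx : (t == x) = false := by simpa using Ne.symm hxt
      rw [hbeq, ih hl]
      have hne : ¬ (t = x) := Ne.symm hxt
      simp [hne]

-- column scan: citers of t read from the edge stream = citers of t read from the forward index
theorem pv_colscan (lessons : List (String × List (String × List String))) (t : String) :
    ∀ (ls : List (String × List (String × List String))),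
    (((ls.flatMap (fun p => (PySem.Set.ofList (pvFilt lessons p)).map (fun r => (p.1, r)))).filter
        (fun q => q.2 == t)).map Prod.fst)
    = (((ls.map (fun p => (p.1, PySem.List.dedup (pvFilt lessons p)))).filter
        (fun q => q.2.contains t)).map Prod.fst) := by
  intro ls
  induction ls with
  | nil => simp
  | cons p ls ih =>
    simp only [List.flatMap_cons, List.map_cons, List.filter_append, List.filter_cons,
      List.map_append]
    rw [List.filter_map]
    have h1 : ((fun q : String × String => q.2 == t) ∘ fun r => (p.1, r))
        = (fun x : String => x == t) := rfl
    rw [h1, pv_filter_beq_of_nodup t _ (PySem.Set.nodup_ofList _)]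
    simp only [PySem.List.dedup_eq_ofList]
    by_cases hm : t ∈ pvFilt lessons p
    · simp [hm, ih]
    · simp [hm, ih]

-- ===== VERDICT (by name: the statement is the Claim_ definition above) =====
theorem build_citation_graph_spec : Claim_equal_build_citation_graph := by
  intro lessons _ hpre
  unfold Spec_build_citation_graph
  obtain ⟨hnd, _⟩ := hpre
  show [("forward",
      (lessons.foldl (fun st p =>
        (pvRefs p).foldl (fun st ref =>
          if pvCond lessons p.1 ref then
            ((st.1 : SD).modify p.1 [] (fun s => PySem.Set.add s ref),
             (st.2 : SD).modify ref [] (fun s => PySem.Set.add s p.1))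
          else st) st) ((PySem.Dict.empty, PySem.Dict.empty) : SD × SD)).1.items),
    ("reverse",
      (lessons.foldl (fun st p =>
        (pvRefs p).foldl (fun st ref =>
          if pvCond lessons p.1 ref then
            ((st.1 : SD).modify p.1 [] (fun s => PySem.Set.add s ref),
             (st.2 : SD).modify ref [] (fun s => PySem.Set.add s p.1))
          else st) st) ((PySem.Dict.empty, PySem.Dict.empty) : SD × SD)).2.items)]
    = build_citation_graph_alt lessons
  rw [pv_main lessons lessons PySem.Dict.empty PySem.Dict.empty hnd
    (by intro p _; simp) (by simp)]
  -- abbreviations for B's let-bound pieces, phrased through pvFilt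
  have hfwdRefs : (lessons.map (fun p =>
      (p.1, PySem.List.dedup ((((PySem.Dict.mk p.2).get? "all_refs").getD []).filter
        (fun r => (PySem.Dict.mk lessons).contains r && r != p.1)))))
      = lessons.map (fun p => (p.1, PySem.List.dedup (pvFilt lessons p))) := rfl
  show _ = build_citation_graph_alt lessons
  rw [build_citation_graph_alt]
  simp only [hfwdRefs]
  -- forward dicts agree
  have hF : (lessons.foldl (fun fwd p =>
        let refs : PySem.Set String := PySem.Set.ofList (pvFilt lessons p)
        if refs ≠ [] then fwd.insert p.1 refs else fwd) (PySem.Dict.empty : SD))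
      = ((lessons.map (fun p => (p.1, PySem.List.dedup (pvFilt lessons p)))).foldl
        (fun fwd q => if q.2 ≠ [] then fwd.insert q.1 (PySem.Set.ofList q.2) else fwd)
        (PySem.Dict.empty : SD)) := by
    rw [List.foldl_map]
    apply PySem.List.foldl_congr_mem
    intro fwd p _
    simp only [PySem.List.dedup_eq_ofList,
      PySem.Set.ofList_eq_self_of_nodup _ (PySem.Set.nodup_ofList _)]
  -- reverse dicts have equal items
  have hkeys : ((pvEdges lessons).foldl
        (fun R q => R.modify q.2 [] (fun s => PySem.Set.add s q.1))
        (PySem.Dict.empty : SD)).keys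
      = PySem.Set.ofList ((pvEdges lessons).map Prod.snd) := by
    rw [PySem.Dict.keys_foldl_modify_key (pvEdges lessons) Prod.snd []
      (fun _ q => fun s => PySem.Set.add s q.1) PySem.Dict.empty]
    simp [PySem.Set.update, PySem.Set.ofList_eq_foldl]
  have hndR : ((pvEdges lessons).foldl
        (fun R q => R.modify q.2 [] (fun s => PySem.Set.add s q.1))
        (PySem.Dict.empty : SD)).keys.Nodup := by
    rw [hkeys]; exact PySem.Set.nodup_ofList _
  have htargets : PySem.Set.ofList ((pvEdges lessons).map Prod.snd)
      = PySem.List.dedup ((lessons.map (fun p =>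
          (p.1, PySem.List.dedup (pvFilt lessons p)))).flatMap Prod.snd) := by
    simp only [PySem.List.dedup_eq_ofList, pvEdges, List.map_flatMap, List.flatMap_map]
    congr 1
    apply List.flatMap_congr
    intro p _
    simp [List.map_map, Function.comp_def]
  have hR : (lessons.foldl (fun R p =>
        (PySem.Set.ofList (pvFilt lessons p)).foldl (pvStepR p.1) R)
        (PySem.Dict.empty : SD)).items
      = ((PySem.List.dedup ((lessons.map (fun p =>
            (p.1, PySem.List.dedup (pvFilt lessons p)))).flatMap Prod.snd)).foldl
          (fun rev t => rev.insert t (PySem.Set.ofList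
            (((lessons.map (fun p => (p.1, PySem.List.dedup (pvFilt lessons p)))).filter
              (fun q => q.2.contains t)).map Prod.fst)))
          (PySem.Dict.empty : SD)).items := by
    rw [pv_R_flat]
    rw [PySem.Dict.items_eq_map_keys _ hndR []]
    rw [PySem.Dict.items_foldl_insert_fresh _ (fun t => t)
      (fun t => PySem.Set.ofList
        (((lessons.map (fun p => (p.1, PySem.List.dedup (pvFilt lessons p)))).filter
          (fun q => q.2.contains t)).map Prod.fst))
      PySem.Dict.empty (by intro a _; simp)
      (by simp)]
    rw [hkeys, htargets]
    simp only [show (PySem.Dict.empty : SD).items = [] from rfl, List.nil_append]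
    apply List.map_congr_left
    intro t _
    congr 1
    rw [pv_getD_fold t (pvEdges lessons) PySem.Dict.empty]
    rw [PySem.Dict.getD_empty, PySem.Set.update_nil_left]
    have := pv_colscan lessons t lessons
    rw [pvEdges, this]
  simp only [hF, hR]
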